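-- pv_equiv track=rewrite | github.com/Imkun-on/rotten-tomatoes-sentiment-scraper | cli.py | parse_season_selection
-- ===== SOURCE A (Python) =====
-- def parse_season_selection(spec: str, total: int) -> list[int]:
--     """Parse '1', '1-3', '1,3,5', '1-2,4', 'all' into a sorted list of indices.
--
--     Indices are 1-based positions into the season list, NOT season numbers.
--     Invalid tokens are ignored; out-of-range indices are clamped.
--     """
--     spec = (spec or "").strip().lower()
--     if not spec or spec in ("all", "a", "*"):
--         return list(range(1, total + 1))
--
--     picked: set[int] = set()
--     for token in spec.split(","):
--         token = token.strip()
--         if not token: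
--             continue
--         if "-" in token:
--             try:
--                 a, b = token.split("-", 1)
--                 lo, hi = int(a), int(b)
--                 if lo > hi:
--                     lo, hi = hi, lo
--                 for i in range(max(1, lo), min(total, hi) + 1):
--                     picked.add(i)
--             except ValueError:
--                 continue
--         else:
--             try:
--                 i = int(token)
--                 if 1 <= i <= total:
--                     picked.add(i)
--             except ValueError:
--                 continue
--     return sorted(picked)
-- ===== SOURCE B (Python) =====
-- def parse_season_selection(spec: str, total: int) -> list[int]:
--     """Parse a season selection spec into a sorted list of 1-based indices.
--
--     Collects clamped (lo, hi) intervals per token, sorts them by their low end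
--     and merges overlapping/adjacent ones, then emits each merged run directly
--     -- no set, no per-index sort.
--     """
--     spec = (spec or "").strip().lower()
--     if not spec or spec in ("all", "a", "*"):
--         return list(range(1, total + 1))
--
--     intervals: list[tuple[int, int]] = []
--     for token in spec.split(","):
--         token = token.strip()
--         if not token:
--             continue
--         if "-" in token:
--             try:
--                 a, b = token.split("-", 1)
--                 lo, hi = int(a), int(b)
--             except ValueError:
--                 continue
--             if lo > hi:
--                 lo, hi = hi, lo
--             intervals.append((max(1, lo), min(total, hi)))
--         else:
--             try:
--                 i = int(token)
--             except ValueError: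
--                 continue
--             if 1 <= i <= total:
--                 intervals.append((i, i))
--
--     out: list[int] = []
--     cur = None
--     for lo, hi in sorted(intervals, key=lambda p: p[0]):
--         if lo > hi:
--             continue
--         if cur is None:
--             cur = (lo, hi)
--         elif lo <= cur[1] + 1:
--             cur = (cur[0], max(cur[1], hi))
--         else:
--             out.extend(range(cur[0], cur[1] + 1))
--             cur = (lo, hi)
--     if cur is not None:
--         out.extend(range(cur[0], cur[1] + 1))
--     return out
-- ===== Notes on version B (the rewrite author's own statement) =====
-- stated objective: alternative
-- what changed: B drops A's per-index set accumulation and comparison sort of indices: it collects one clamped (lo,hi) interval per token, sorts the intervals by low end, merges overlapping/adjacent runs, and emits each merged run directly, so deduplication and ordering come from the interval sweep instead of a set and sorted().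
import Mathlib
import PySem

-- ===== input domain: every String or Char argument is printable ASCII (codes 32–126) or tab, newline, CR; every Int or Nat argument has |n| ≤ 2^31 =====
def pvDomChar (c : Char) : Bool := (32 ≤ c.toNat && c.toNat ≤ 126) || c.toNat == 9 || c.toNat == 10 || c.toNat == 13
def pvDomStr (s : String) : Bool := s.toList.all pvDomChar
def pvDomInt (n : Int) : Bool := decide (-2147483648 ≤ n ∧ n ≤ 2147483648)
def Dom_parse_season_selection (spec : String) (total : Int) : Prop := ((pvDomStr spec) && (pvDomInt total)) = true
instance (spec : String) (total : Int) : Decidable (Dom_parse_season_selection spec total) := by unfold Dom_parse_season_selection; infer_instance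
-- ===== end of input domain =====

-- B replaces A's set-accumulate-then-sort with clamped (lo,hi) intervals that are
-- sorted by low end, merged, and emitted run by run; equivalence is about return values.

-- ===== PORT A =====
-- body of A's loop over 'spec.split(",")', after 'token = token.strip()'
def pvStepTokA (total : Int) (picked : PySem.Set Int) (token : String) : PySem.Set Int :=
  if token = "" then picked
  else if PySem.Str.isIn "-" token then
    match PySem.Str.splitMax? token "-" 1 with
    | some [a, b] =>
      match PySem.Int.ofStr? a, PySem.Int.ofStr? b with
      | some lo₀, some hi₀ =>
        let lo := if lo₀ > hi₀ then hi₀ else lo₀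
        let hi := if lo₀ > hi₀ then lo₀ else hi₀
        (PySem.List.pyRange (max 1 lo) (min total hi + 1) 1).foldl PySem.Set.add picked
      | _, _ => picked
    | _ => picked
  else
    match PySem.Int.ofStr? token with
    | some i => if 1 ≤ i ∧ i ≤ total then PySem.Set.add picked i else picked
    | none => picked

-- loop body of A: 'token = token.strip()' then the branch analysis
def pvStepA (total : Int) (picked : PySem.Set Int) (token : String) : PySem.Set Int :=
  pvStepTokA total picked (PySem.Str.strip token)

def parse_season_selection (spec : String) (total : Int) : List Int :=
  let spec := PySem.Str.lower (PySem.Str.strip spec)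
  if spec = "" ∨ spec = "all" ∨ spec = "a" ∨ spec = "*" then
    PySem.List.pyRange 1 (total + 1) 1
  else
    -- split? is none only for an empty separator; the separator here is ","
    let picked : PySem.Set Int := ((PySem.Str.split? spec ",").getD []).foldl (pvStepA total) PySem.Set.empty
    PySem.List.sorted picked (fun x => x) false

-- ===== PORT B =====
-- body of B's loop over 'spec.split(",")', after 'token = token.strip()' (collects clamped intervals)
def pvStepTokB (total : Int) (acc : List (Int × Int)) (token : String) : List (Int × Int) :=
  if token = "" then acc
  else if PySem.Str.isIn "-" token then
    match PySem.Str.splitMax? token "-" 1 with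
    | some [a, b] =>
      match PySem.Int.ofStr? a, PySem.Int.ofStr? b with
      | some lo₀, some hi₀ =>
        let lo := if lo₀ > hi₀ then hi₀ else lo₀
        let hi := if lo₀ > hi₀ then lo₀ else hi₀
        acc ++ [(max 1 lo, min total hi)]
      | _, _ => acc
    | _ => acc
  else
    match PySem.Int.ofStr? token with
    | some i => if 1 ≤ i ∧ i ≤ total then acc ++ [(i, i)] else acc
    | none => acc

-- loop body of B: 'token = token.strip()' then the branch analysis
def pvStepB (total : Int) (acc : List (Int × Int)) (token : String) : List (Int × Int) :=
  pvStepTokB total acc (PySem.Str.strip token)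

-- body of B's merge loop: state = (out, cur); skip empty intervals, start/extend/flush a run
def pvMergeStep (st : List Int × Option (Int × Int)) (p : Int × Int) : List Int × Option (Int × Int) :=
  if p.1 > p.2 then st
  else
    match st.2 with
    | none => (st.1, some p)
    | some cur =>
      if p.1 ≤ cur.2 + 1 then (st.1, some (cur.1, max cur.2 p.2))
      else (st.1 ++ PySem.List.pyRange cur.1 (cur.2 + 1) 1, some p)

-- B's trailing 'if cur is not None: out.extend(range(cur[0], cur[1] + 1))'
def pvEmit (st : List Int × Option (Int × Int)) : List Int :=
  st.1 ++ match st.2 with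
          | none => []
          | some cur => PySem.List.pyRange cur.1 (cur.2 + 1) 1

def parse_season_selection_alt (spec : String) (total : Int) : List Int :=
  let spec := PySem.Str.lower (PySem.Str.strip spec)
  if spec = "" ∨ spec = "all" ∨ spec = "a" ∨ spec = "*" then
    PySem.List.pyRange 1 (total + 1) 1
  else
    -- split? is none only for an empty separator; the separator here is ","
    let intervals := ((PySem.Str.split? spec ",").getD []).foldl (pvStepB total) []
    pvEmit ((PySem.List.sorted intervals (fun p => p.1) false).foldl pvMergeStep ([], none))

-- ===== PRECONDITION & SPEC =====
def Spec_parse_season_selection (spec : String) (total : Int) (out : List Int) : Prop := out = parse_season_selection_alt spec total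
instance (spec : String) (total : Int) (out : List Int) : Decidable (Spec_parse_season_selection spec total out) := by unfold Spec_parse_season_selection; infer_instance

-- ===== CLAIM (what is proved, stated in full; the proofs are below) =====
def Claim_equal_parse_season_selection : Prop := ∀ (spec : String) (total : Int), Dom_parse_season_selection spec total → Spec_parse_season_selection spec total (parse_season_selection spec total)

-- ===== LEMMAS AND PROOFS =====

theorem pv_mem_foldl_add (xs : List Int) (s : PySem.Set Int) (i : Int) :
    i ∈ xs.foldl PySem.Set.add s ↔ i ∈ s ∨ i ∈ xs := by
  induction xs generalizing s with
  | nil => simp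
  | cons x t ih =>
    simp only [List.foldl_cons, ih, PySem.Set.mem_add, List.mem_cons]
    tauto

theorem pv_nodup_foldl_add (xs : List Int) (s : PySem.Set Int) (h : s.Nodup) :
    (xs.foldl PySem.Set.add s).Nodup := by
  induction xs generalizing s with
  | nil => exact h
  | cons x t ih => exact ih _ (PySem.Set.nodup_add _ _ h)

-- "index i is covered by some interval of I"
def pvCov (I : List (Int × Int)) (i : Int) : Prop := ∃ p ∈ I, p.1 ≤ i ∧ i ≤ p.2

theorem pv_cov_append (I : List (Int × Int)) (q : Int × Int) (i : Int) :
    pvCov (I ++ [q]) i ↔ pvCov I i ∨ (q.1 ≤ i ∧ i ≤ q.2) := by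
  unfold pvCov
  constructor
  · rintro ⟨p, hp, h⟩
    rcases List.mem_append.1 hp with hp | hp
    · exact Or.inl ⟨p, hp, h⟩
    · simp only [List.mem_singleton] at hp; subst hp; exact Or.inr h
  · rintro (⟨p, hp, h⟩ | h)
    · exact ⟨p, List.mem_append_left _ hp, h⟩
    · exact ⟨q, List.mem_append_right _ (List.mem_singleton.2 rfl), h⟩

theorem pv_cov_cons (p : Int × Int) (I : List (Int × Int)) (x : Int) :
    pvCov (p :: I) x ↔ (p.1 ≤ x ∧ x ≤ p.2) ∨ pvCov I x := by
  unfold pvCov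
  constructor
  · rintro ⟨q, hq, h⟩
    rcases List.mem_cons.1 hq with rfl | hq
    · exact Or.inl h
    · exact Or.inr ⟨q, hq, h⟩
  · rintro (h | ⟨q, hq, h⟩)
    · exact ⟨p, by simp, h⟩
    · exact ⟨q, List.mem_cons_of_mem _ hq, h⟩

theorem pv_step_tok_inv (total : Int) (t : String) (S : PySem.Set Int) (I : List (Int × Int))
    (hnd : S.Nodup) (hmem : ∀ i, i ∈ S ↔ pvCov I i) :
    (pvStepTokA total S t).Nodup ∧
      (∀ i, i ∈ pvStepTokA total S t ↔ pvCov (pvStepTokB total I t) i) := by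
  unfold pvStepTokA pvStepTokB
  by_cases h0 : t = ""
  · rw [if_pos h0, if_pos h0]
    exact ⟨hnd, hmem⟩
  · rw [if_neg h0, if_neg h0]
    by_cases h1 : PySem.Str.isIn "-" t = true
    · rw [if_pos h1, if_pos h1]
      cases hsp : PySem.Str.splitMax? t "-" 1 with
      | none => dsimp only; exact ⟨hnd, hmem⟩
      | some l =>
        match l with
        | [] => dsimp only; exact ⟨hnd, hmem⟩
        | [a] => dsimp only; exact ⟨hnd, hmem⟩
        | a :: b :: c :: r => dsimp only; exact ⟨hnd, hmem⟩
        | [a, b] =>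
          dsimp only
          cases hA : PySem.Int.ofStr? a with
          | none => dsimp only; exact ⟨hnd, hmem⟩
          | some lo₀ =>
            cases hB : PySem.Int.ofStr? b with
            | none => dsimp only; exact ⟨hnd, hmem⟩
            | some hi₀ =>
              dsimp only
              refine ⟨pv_nodup_foldl_add _ _ hnd, ?_⟩
              intro i
              rw [pv_mem_foldl_add, PySem.List.mem_pyRange_one, hmem, pv_cov_append]
              constructor
              · rintro (h | h)
                · exact Or.inl h
                · exact Or.inr (by constructor <;> omega)
              · rintro (h | h)
                · exact Or.inl h
                · refine Or.inr ⟨h.1, by omega⟩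
    · rw [if_neg h1, if_neg h1]
      cases hI : PySem.Int.ofStr? t with
      | none => dsimp only; exact ⟨hnd, hmem⟩
      | some i =>
        dsimp only
        by_cases hr : 1 ≤ i ∧ i ≤ total
        · rw [if_pos hr, if_pos hr]
          refine ⟨PySem.Set.nodup_add _ _ hnd, ?_⟩
          intro j
          rw [PySem.Set.mem_add, hmem, pv_cov_append]
          constructor
          · rintro (h | h)
            · exact Or.inl h
            · exact Or.inr (by constructor <;> omega)
          · rintro (h | h)
            · exact Or.inl h
            · exact Or.inr (by rcases h with ⟨h1, h2⟩; omega)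
        · rw [if_neg hr, if_neg hr]
          exact ⟨hnd, hmem⟩

theorem pv_fold_inv (total : Int) (toks : List String) (S : PySem.Set Int) (I : List (Int × Int))
    (hnd : S.Nodup) (hmem : ∀ i, i ∈ S ↔ pvCov I i) :
    (toks.foldl (pvStepA total) S).Nodup ∧
      (∀ i, i ∈ toks.foldl (pvStepA total) S ↔ pvCov (toks.foldl (pvStepB total) I) i) := by
  induction toks generalizing S I with
  | nil => exact ⟨hnd, hmem⟩
  | cons tok rest ih =>
    obtain ⟨h1, h2⟩ := pv_step_tok_inv total (PySem.Str.strip tok) S I hnd hmem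
    exact ih _ _ h1 h2

theorem pv_emit_pairwise (out : List Int) (cl ch : Int) (hout : out.Pairwise (· < ·))
    (hlt : ∀ x ∈ out, x < cl) :
    (out ++ PySem.List.pyRange cl (ch + 1) 1).Pairwise (· < ·) := by
  rw [List.pairwise_append]
  refine ⟨hout, PySem.List.pairwise_lt_pyRange_one _ _, ?_⟩
  intro x hx y hy
  have h1 := PySem.List.mem_pyRange_one.1 hy
  have h2 := hlt x hx
  omega

theorem pv_merge_go (ivs : List (Int × Int)) (out : List Int) (cur : Option (Int × Int))
    (hs : ivs.Pairwise (fun p q => p.1 ≤ q.1))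
    (hout : out.Pairwise (· < ·))
    (hnone : cur = none → out = [])
    (hsome : ∀ c, cur = some c → c.1 ≤ c.2 ∧ (∀ x ∈ out, x < c.1) ∧ (∀ p ∈ ivs, c.1 ≤ p.1)) :
    (pvEmit (ivs.foldl pvMergeStep (out, cur))).Pairwise (· < ·) ∧
      ∀ x, x ∈ pvEmit (ivs.foldl pvMergeStep (out, cur)) ↔ x ∈ pvEmit (out, cur) ∨ pvCov ivs x := by
  induction ivs generalizing out cur with
  | nil =>
    refine ⟨?_, fun x => by simp [pvCov]⟩
    cases cur with
    | none => simpa [pvEmit] using hout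
    | some q =>
      obtain ⟨h1, h2, -⟩ := hsome q rfl
      simpa [pvEmit] using pv_emit_pairwise out q.1 q.2 hout h2
  | cons p rest ih =>
    rw [List.foldl_cons]
    by_cases hemp : p.1 > p.2
    · have hstep : pvMergeStep (out, cur) p = (out, cur) := by
        unfold pvMergeStep; rw [if_pos hemp]
      rw [hstep]
      obtain ⟨ha, hb⟩ := ih out cur hs.of_cons hout hnone
        (fun c h => by
          obtain ⟨u, v, w⟩ := hsome c h
          exact ⟨u, v, fun q hq => w q (List.mem_cons_of_mem _ hq)⟩)
      refine ⟨ha, fun x => ?_⟩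
      rw [hb x, pv_cov_cons]
      constructor
      · rintro (h | h)
        · exact Or.inl h
        · exact Or.inr (Or.inr h)
      · rintro (h | hpx | h)
        · exact Or.inl h
        · exact absurd hpx (by omega)
        · exact Or.inr h
    · cases cur with
      | none =>
        have h0 : out = [] := hnone rfl
        subst h0
        have hstep : pvMergeStep (([] : List Int), (none : Option (Int × Int))) p = ([], some p) := by
          unfold pvMergeStep; rw [if_neg hemp]
        rw [hstep]
        obtain ⟨ha, hb⟩ := ih [] (some p) hs.of_cons List.Pairwise.nil
          (fun h => nomatch h)
          (fun c h => by
            obtain rfl := Option.some.inj h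
            refine ⟨by omega, by simp, ?_⟩
            intro q hq
            exact List.rel_of_pairwise_cons hs hq)
        refine ⟨ha, fun x => ?_⟩
        rw [hb x, pv_cov_cons]
        simp only [pvEmit, List.nil_append, List.not_mem_nil, false_or,
          PySem.List.mem_pyRange_one, Int.lt_add_one_iff]
      | some q =>
        obtain ⟨hcl, hout_lt, hfl⟩ := hsome q rfl
        have hqp : q.1 ≤ p.1 := hfl p (by simp)
        by_cases hadj : p.1 ≤ q.2 + 1
        · have hstep : pvMergeStep (out, some q) p = (out, some (q.1, max q.2 p.2)) := by
            unfold pvMergeStep; rw [if_neg hemp]; dsimp only; rw [if_pos hadj]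
          rw [hstep]
          obtain ⟨ha, hb⟩ := ih out (some (q.1, max q.2 p.2)) hs.of_cons hout
            (fun h => nomatch h)
            (fun c h => by
              obtain rfl := Option.some.inj h
              refine ⟨by dsimp only; omega, fun x hx => hout_lt x hx, ?_⟩
              intro r hr
              exact hfl r (List.mem_cons_of_mem _ hr))
          refine ⟨ha, fun x => ?_⟩
          rw [hb x, pv_cov_cons]
          simp only [pvEmit, List.mem_append, PySem.List.mem_pyRange_one, Int.lt_add_one_iff]
          constructor
          · rintro ((hx | hA) | hC)
            · exact Or.inl (Or.inl hx)
            · by_cases hxq : x ≤ q.2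
              · exact Or.inl (Or.inr ⟨hA.1, hxq⟩)
              · refine Or.inr (Or.inl ⟨by omega, by rcases le_total q.2 p.2 with hm | hm <;> omega⟩)
            · exact Or.inr (Or.inr hC)
          · rintro ((hx | hB) | hD | hC)
            · exact Or.inl (Or.inl hx)
            · exact Or.inl (Or.inr ⟨hB.1, by omega⟩)
            · exact Or.inl (Or.inr ⟨by omega, by rcases le_total q.2 p.2 with hm | hm <;> omega⟩)
            · exact Or.inr hC
        · have hstep : pvMergeStep (out, some q) p =
              (out ++ PySem.List.pyRange q.1 (q.2 + 1) 1, some p) := by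
            unfold pvMergeStep; rw [if_neg hemp]; dsimp only; rw [if_neg hadj]
          rw [hstep]
          obtain ⟨ha, hb⟩ := ih (out ++ PySem.List.pyRange q.1 (q.2 + 1) 1) (some p) hs.of_cons
            (pv_emit_pairwise out q.1 q.2 hout hout_lt)
            (fun h => nomatch h)
            (fun c h => by
              obtain rfl := Option.some.inj h
              refine ⟨by omega, ?_, ?_⟩
              · intro x hx
                rcases List.mem_append.1 hx with hx | hx
                · have := hout_lt x hx; omega
                · have := PySem.List.mem_pyRange_one.1 hx; omega
              · intro r hr
                exact List.rel_of_pairwise_cons hs hr)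
          refine ⟨ha, fun x => ?_⟩
          rw [hb x, pv_cov_cons]
          simp only [pvEmit, List.mem_append, PySem.List.mem_pyRange_one, Int.lt_add_one_iff,
            List.append_assoc]
          tauto

-- ===== VERDICT (by name: the statement is the Claim_ definition above) =====
theorem parse_season_selection_spec : Claim_equal_parse_season_selection := by
  unfold Claim_equal_parse_season_selection Spec_parse_season_selection
  intro spec total _
  simp only [parse_season_selection, parse_season_selection_alt]
  set s := PySem.Str.lower (PySem.Str.strip spec) with hs
  by_cases h : s = "" ∨ s = "all" ∨ s = "a" ∨ s = "*"
  · simp only [if_pos h]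
  · simp only [if_neg h]
    obtain ⟨hnd, hmem⟩ := pv_fold_inv total ((PySem.Str.split? s ",").getD [])
      PySem.Set.empty [] (by simp [PySem.Set.empty]) (by simp [PySem.Set.empty, pvCov])
    set S := ((PySem.Str.split? s ",").getD []).foldl (pvStepA total) PySem.Set.empty
    set I := ((PySem.Str.split? s ",").getD []).foldl (pvStepB total) []
    set ivs := PySem.List.sorted I (fun p => p.1) false with hivs
    have hcovperm : ∀ x, pvCov ivs x ↔ pvCov I x := by
      intro x
      unfold pvCov
      constructor <;> rintro ⟨p, hp, hx⟩
      · exact ⟨p, (PySem.List.sorted_perm (xs := I) (key := fun p => p.1) (rev := false)).subset hp, hx⟩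
      · exact ⟨p, (PySem.List.sorted_perm (xs := I) (key := fun p => p.1) (rev := false)).mem_iff.2 hp, hx⟩
    obtain ⟨hpw, hmem2⟩ := pv_merge_go ivs [] none
      (PySem.List.sorted_pairwise (xs := I) (key := fun p => p.1)) List.Pairwise.nil
      (fun _ => rfl) (fun c h => nomatch h)
    apply PySem.List.sorted_eq_of_perm_of_pairwise_lt
    · rw [List.perm_ext_iff_of_nodup (hpw.imp (fun hlt => ne_of_lt hlt)) hnd]
      intro x
      rw [hmem2 x, hmem x, hcovperm x]
      simp [pvEmit]
    · exact hpw
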